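-- pv_equiv track=rewrite | github.com/Abd-zak/cdi_dislo | cdi_dislo/dislocations/dislocation.py | rearrange_with_indices
-- ===== SOURCE A (Python) =====
-- def rearrange_with_indices(first_list, second_list):
--     indexed_first = list(enumerate(first_list))
--     matching = [
--         (i, e) for target in second_list for i, e in indexed_first if e == target
--     ]
--     remaining = [(i, e) for i, e in indexed_first if e not in second_list]
--     rearranged = [e for i, e in matching + remaining]
--     original_indices = [i for i, e in matching + remaining]
--     return rearranged, original_indices
-- ===== SOURCE B (Python) =====
-- def rearrange_with_indices(first_list, second_list):
--     indexed = list(enumerate(first_list))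
--     groups = {}
--     for i, e in indexed:
--         groups.setdefault(e, []).append((i, e))
--     second_set = set(second_list)
--     pairs = [p for t in second_list for p in groups.get(t, [])]
--     pairs += [(i, e) for i, e in indexed if e not in second_set]
--     return [e for i, e in pairs], [i for i, e in pairs]
-- ===== Notes on version B (the rewrite author's own statement) =====
-- stated objective: faster
-- what changed: B builds a value->(index,element) dict in one pass over first_list and a set of second_list, replacing A's inner scan of first_list per target and the per-element 'e not in second_list' list scan.
import Mathlib
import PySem

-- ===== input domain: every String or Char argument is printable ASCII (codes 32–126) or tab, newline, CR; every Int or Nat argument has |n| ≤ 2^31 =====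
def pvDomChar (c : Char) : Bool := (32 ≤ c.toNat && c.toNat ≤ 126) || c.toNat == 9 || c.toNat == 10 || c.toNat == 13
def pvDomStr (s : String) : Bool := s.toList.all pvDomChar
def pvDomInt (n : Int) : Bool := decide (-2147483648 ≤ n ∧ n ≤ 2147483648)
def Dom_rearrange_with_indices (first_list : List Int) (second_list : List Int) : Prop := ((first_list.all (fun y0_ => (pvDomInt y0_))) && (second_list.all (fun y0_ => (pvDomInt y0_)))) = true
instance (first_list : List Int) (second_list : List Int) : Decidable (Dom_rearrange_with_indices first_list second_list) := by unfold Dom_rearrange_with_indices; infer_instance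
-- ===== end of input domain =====

-- B replaces A's per-target scan of first_list and per-element list membership test with a
-- value→(index,element) dict built in one pass plus a set of second_list (O(n+m) vs O(n*m)).

-- ===== PORT A =====
def rearrange_with_indices (first_list : List Int) (second_list : List Int) : List Int × List Int :=
  let indexed := PySem.List.enumerate first_list
  let matching := second_list.flatMap (fun target => indexed.filter (fun p => p.2 == target))
  let remaining := indexed.filter (fun p => !(second_list.contains p.2))
  let all := matching ++ remaining
  (all.map (·.2), all.map (·.1))

-- ===== PORT B =====
def rearrange_with_indices_alt (first_list : List Int) (second_list : List Int) : List Int × List Int :=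
  let indexed := PySem.List.enumerate first_list
  let groups := indexed.foldl (fun d p => d.modify p.2 [] (fun l => l ++ [p])) PySem.Dict.empty
  let second_set := PySem.Set.ofList second_list
  let pairs := second_list.flatMap (fun t => groups.getD t []) ++
    indexed.filter (fun p => !(PySem.Set.contains second_set p.2))
  (pairs.map (·.2), pairs.map (·.1))

-- ===== PRECONDITION & SPEC =====
def Spec_rearrange_with_indices (first_list : List Int) (second_list : List Int) (out : List Int × List Int) : Prop := out = rearrange_with_indices_alt first_list second_list
instance (first_list : List Int) (second_list : List Int) (out : List Int × List Int) : Decidable (Spec_rearrange_with_indices first_list second_list out) := by unfold Spec_rearrange_with_indices; infer_instance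

-- ===== CLAIM (what is proved, stated in full; the proofs are below) =====
def Claim_equal_rearrange_with_indices : Prop := ∀ (first_list : List Int) (second_list : List Int), Dom_rearrange_with_indices first_list second_list → Spec_rearrange_with_indices first_list second_list (rearrange_with_indices first_list second_list)

-- ===== LEMMAS AND PROOFS =====

-- B's grouping dict looked up at t yields exactly the pairs of first_list whose value is t,
-- in original order — the list A's inner scan produces for target t.
lemma getD_groups (xs : List (Int × Int)) (t : Int) :
    (xs.foldl (fun d p => d.modify p.2 [] (fun l => l ++ [p])) PySem.Dict.empty).getD t []
      = xs.filter (fun p => p.2 == t) := by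
  have h := PySem.Dict.getD_foldl_modify_append (l := xs.map (fun p => (p.2, p)))
    (d := PySem.Dict.empty) (c := t)
  rw [List.foldl_map] at h
  rw [List.filter_map, List.map_map] at h
  simpa [Function.comp_def] using h

-- ===== VERDICT (by name: the statement is the Claim_ definition above) =====
theorem rearrange_with_indices_spec : Claim_equal_rearrange_with_indices := by
  intro f s _
  unfold Spec_rearrange_with_indices
  simp [rearrange_with_indices, rearrange_with_indices_alt, getD_groups]
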